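-- pv_equiv track=rewrite | github.com/chrisimcevoy/pyoda-time | pyoda_time/calendars.py | __generate_total_days_by_month
-- ===== SOURCE A (Python) =====
-- import typing as _typing
--
-- def __generate_total_days_by_month(
--     long_month_length: int, short_month_length: int
-- ) -> _typing.Generator[int, _typing.Any, None]:
--     days = 0
--     for i in range(1, 13):
--         yield days
--         days_in_month = long_month_length if (i & 1) == 1 else short_month_length
--         days += days_in_month
-- ===== SOURCE B (Python) =====
-- import typing as _typing
--
-- def __generate_total_days_by_month(
--     long_month_length: int, short_month_length: int
-- ) -> _typing.Generator[int, _typing.Any, None]: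
--     # Closed form: among months 1..i-1, i//2 are odd (long) and (i-1)//2 are even (short).
--     for i in range(1, 13):
--         yield (i // 2) * long_month_length + ((i - 1) // 2) * short_month_length
-- ===== Notes on version B (the rewrite author's own statement) =====
-- stated objective: simpler
-- what changed: The running-sum accumulator threaded through the loop is removed; each yielded value is computed directly by the closed form (i//2)*long + ((i-1)//2)*short.
import Mathlib
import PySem

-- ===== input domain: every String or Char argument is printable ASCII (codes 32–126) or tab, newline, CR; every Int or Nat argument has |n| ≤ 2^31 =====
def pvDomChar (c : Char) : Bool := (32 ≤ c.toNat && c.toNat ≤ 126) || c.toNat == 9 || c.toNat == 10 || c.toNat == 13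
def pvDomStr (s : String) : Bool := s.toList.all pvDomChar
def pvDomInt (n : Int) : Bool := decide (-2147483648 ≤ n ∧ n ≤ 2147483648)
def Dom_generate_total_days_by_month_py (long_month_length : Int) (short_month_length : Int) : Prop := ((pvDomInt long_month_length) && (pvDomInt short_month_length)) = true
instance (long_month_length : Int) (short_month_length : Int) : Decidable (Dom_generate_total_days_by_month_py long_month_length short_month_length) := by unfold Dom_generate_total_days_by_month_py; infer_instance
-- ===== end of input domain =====

-- ===== PORT A =====
-- A: loop i=1..12 threading (yielded list, running days sum); i & 1 == 1 ported as i % 2 == 1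
-- (exact for i in 1..12, all nonnegative).
def generate_total_days_by_month_py (long_month_length : Int) (short_month_length : Int) : List Int :=
  (((PySem.List.pyRange 1 13 1).foldl
      (fun (st : List Int × Int) (i : Int) =>
        let days := st.2
        let out := st.1 ++ [days]
        let days_in_month := if i % 2 == 1 then long_month_length else short_month_length
        (out, days + days_in_month))
      ([], 0)).1)

-- ===== PORT B =====
-- B: closed form per month, no accumulator; Python's i//2 ported as PySem.Int.floordiv.
def generate_total_days_by_month_py_alt (long_month_length : Int) (short_month_length : Int) : List Int :=
  (PySem.List.pyRange 1 13 1).map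
    (fun i => (PySem.Int.floordiv i 2) * long_month_length
            + (PySem.Int.floordiv (i - 1) 2) * short_month_length)

-- ===== PRECONDITION & SPEC =====
def Spec_generate_total_days_by_month_py (long_month_length : Int) (short_month_length : Int) (out : List Int) : Prop := out = generate_total_days_by_month_py_alt long_month_length short_month_length
instance (long_month_length : Int) (short_month_length : Int) (out : List Int) : Decidable (Spec_generate_total_days_by_month_py long_month_length short_month_length out) := by unfold Spec_generate_total_days_by_month_py; infer_instance

-- ===== CLAIM (what is proved, stated in full; the proofs are below) =====
def Claim_equal_generate_total_days_by_month_py : Prop := ∀ (long_month_length : Int) (short_month_length : Int), Dom_generate_total_days_by_month_py long_month_length short_month_length → Spec_generate_total_days_by_month_py long_month_length short_month_length (generate_total_days_by_month_py long_month_length short_month_length)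

-- ===== LEMMAS AND PROOFS =====

-- ===== VERDICT (by name: the statement is the Claim_ definition above) =====
theorem generate_total_days_by_month_py_spec : Claim_equal_generate_total_days_by_month_py := by
  intro l s _
  unfold Spec_generate_total_days_by_month_py
  simp [generate_total_days_by_month_py, generate_total_days_by_month_py_alt,
        PySem.List.pyRange, PySem.Int.floordiv, List.range_succ]
  refine ⟨by ring, by ring, by ring, by ring, by ring, by ring, by ring, by ring, by ring⟩
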